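-- pv_equiv track=rewrite | github.com/jurajzachar/py-ds | py_ds/codility/binary_search_board.py | solution
-- ===== SOURCE A (Python) =====
-- def solution(a: list[int], k: int) -> int:
--     assert len(a), "input list must be non empty"
--     n = len(a)
--
--     def check(x: int) -> int:
--         boards, last = 0, -1
--         for i in range(n):
--             if a[i] == 1 and last < i:
--                 boards += 1
--                 last = i + x - 1
--         return boards
--
--     start, end, result = 0, n-1, -1
--     while start <= end:
--         mid = (start + end) // 2
--         if check(mid) <= k:
--             end = mid - 1
--             result = mid
--         else:
--             start = mid + 1
--     return result
-- ===== SOURCE B (Python) =====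
-- def solution(a: list[int], k: int) -> int:
--     assert len(a), "input list must be non empty"
--     n = len(a)
--     ones = [i for i, v in enumerate(a) if v == 1]
--     m = len(ones)
--
--     def boards_needed(x: int) -> int:
--         count = 0
--         j = 0
--         while j < m:
--             count += 1
--             limit = ones[j] + x - 1
--             j += 1
--             while j < m and ones[j] <= limit:
--                 j += 1
--         return count
--
--     # boards_needed is non-increasing in x, so the first x in [0, n-1]
--     # that needs at most k boards is the answer; no binary search.
--     for x in range(n):
--         if boards_needed(x) <= k:
--             return x
--     return -1
-- ===== Notes on version B (the rewrite author's own statement) =====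
-- stated objective: alternative
-- what changed: B drops the binary search entirely: it precomputes the one-positions once and linearly scans candidate lengths x = 0, 1, ... returning the first x whose span-jumping greedy over the one-positions needs at most k boards (correct because the board count is non-increasing in x), instead of A's binary search over [0, n-1] with a full-array rescan per probe.
import Mathlib
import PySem

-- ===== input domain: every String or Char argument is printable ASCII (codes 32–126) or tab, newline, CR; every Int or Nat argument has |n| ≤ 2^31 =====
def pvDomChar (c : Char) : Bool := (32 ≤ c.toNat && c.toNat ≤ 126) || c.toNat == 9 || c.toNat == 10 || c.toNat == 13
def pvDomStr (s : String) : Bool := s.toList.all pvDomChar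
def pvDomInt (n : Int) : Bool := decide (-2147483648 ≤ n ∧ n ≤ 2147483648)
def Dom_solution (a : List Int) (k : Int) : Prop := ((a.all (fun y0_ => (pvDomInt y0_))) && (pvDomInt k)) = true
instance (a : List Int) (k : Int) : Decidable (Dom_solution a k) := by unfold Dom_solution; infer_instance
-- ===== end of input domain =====

-- B replaces A's binary search + full-array check by a linear first-hit scan of candidate
-- lengths x with a span-jump greedy over the precomputed one-positions (objective:
-- alternative). Return-value equivalence only; neither version mutates its arguments.

-- ===== PORT A =====
-- A's inner check(x): linear scan of all indices 0..n-1 with the (a[i]==1 and last<i) guard.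
def checkA (a : List Int) (n x : Int) : Int :=
  ((PySem.List.pyRange 0 n 1).foldl
    (fun s i => if PySem.List.pyGetD a i 0 = 1 ∧ s.2 < i then (s.1 + 1, i + x - 1) else s)
    ((0 : Int), (-1 : Int))).1

-- A's 'while start <= end' binary search.
def bsearchA (a : List Int) (n k start stop result : Int) : Int :=
  if _h : start ≤ stop then
    let mid := PySem.Int.floordiv (start + stop) 2
    if checkA a n mid ≤ k then bsearchA a n k start (mid - 1) mid
    else bsearchA a n k (mid + 1) stop result
  else result
termination_by (stop - start + 1).toNat
decreasing_by
  · have := PySem.Int.floordiv_two_mid_bounds _h; omega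
  · have := PySem.Int.floordiv_two_mid_bounds _h; omega

def solution (a : List Int) (k : Int) : Int :=
  bsearchA a (a.length : Int) k 0 ((a.length : Int) - 1) (-1)

-- ===== PORT B =====
-- ones = [i for i, v in enumerate(a) if v == 1]
def onesOf (a : List Int) : List Int :=
  ((PySem.List.enumerate a 0).filter (fun p => p.2 == 1)).map (·.1)

-- inner 'while j < m and ones[j] <= limit: j += 1'
def skipB (ones : List Int) (limit : Int) (j : Nat) : Nat :=
  if _h : j < ones.length ∧ ones.getD j 0 ≤ limit then skipB ones limit (j + 1) else j
termination_by ones.length - j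

theorem skipB_le (ones : List Int) (limit : Int) (j : Nat) :
    j ≤ skipB ones limit j := by
  fun_induction skipB with
  | case1 j h ih => omega
  | case2 j h => omega

-- outer 'while j < m' of B's boards_needed(x)
def loopB (ones : List Int) (x count : Int) (j : Nat) : Int :=
  if _h : j < ones.length then
    loopB ones x (count + 1) (skipB ones (ones.getD j 0 + x - 1) (j + 1))
  else count
termination_by ones.length - j
decreasing_by
  have h1 : j + 1 ≤ skipB ones (ones.getD j 0 + x - 1) (j + 1) := skipB_le _ _ _
  omega

def boardsB (ones : List Int) (x : Int) : Int := loopB ones x 0 0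

-- B's 'for x in range(n): if boards_needed(x) <= k: return x' / 'return -1'
def scanB (ones : List Int) (k n x : Int) : Int :=
  if _h : x < n then
    if boardsB ones x ≤ k then x else scanB ones k n (x + 1)
  else -1
termination_by (n - x).toNat

def solution_alt (a : List Int) (k : Int) : Int :=
  scanB (onesOf a) k (a.length : Int) 0

-- ===== PRECONDITION & SPEC =====
-- Pre_ excludes only the empty list, on which A's 'assert len(a)' raises AssertionError.
def Pre_solution (a : List Int) (k : Int) : Prop := a ≠ []
instance (a : List Int) (k : Int) : Decidable (Pre_solution a k) := by unfold Pre_solution; infer_instance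
def pvWitness_solution : List Int × Int := ([1, 0, 1], 2)

def Spec_solution (a : List Int) (k : Int) (out : Int) : Prop := out = solution_alt a k
instance (a : List Int) (k : Int) (out : Int) : Decidable (Spec_solution a k out) := by unfold Spec_solution; infer_instance

-- ===== CLAIM (what is proved, stated in full; the proofs are below) =====
def Claim_equal_solution : Prop := ∀ (a : List Int) (k : Int), Dom_solution a k → Pre_solution a k → Spec_solution a k (solution a k)

-- ===== LEMMAS AND PROOFS =====

-- greedy board count on a list of one-positions: one board per uncovered position
def gcount (x : Int) : List Int → Int
  | [] => 0
  | p :: rest => 1 + gcount x (rest.dropWhile (fun q => decide (q ≤ p + x - 1)))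
termination_by l => l.length
decreasing_by
  have := (List.dropWhile_sublist (l := rest) (p := fun q => decide (q ≤ p + x - 1))).length_le
  simp at *; omega

theorem gcount_cons (x p : Int) (rest : List Int) :
    gcount x (p :: rest) = 1 + gcount x (rest.dropWhile (fun q => decide (q ≤ p + x - 1))) := by
  rw [gcount.eq_def]

theorem gcount_nonneg (x : Int) (l : List Int) : 0 ≤ gcount x l := by
  fun_induction gcount with
  | case1 => simp [gcount]
  | case2 p rest ih => omega

theorem skipB_drop (ones : List Int) (limit : Int) (j : Nat) :
    ones.drop (skipB ones limit j) = (ones.drop j).dropWhile (fun q => decide (q ≤ limit)) := by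
  fun_induction skipB with
  | case1 j h ih =>
    obtain ⟨hj, hle⟩ := h
    have hle' : ones[j] ≤ limit := by rwa [List.getD_eq_getElem _ _ hj] at hle
    rw [List.drop_eq_getElem_cons hj, List.dropWhile_cons]
    simp [hle', ih]
  | case2 j h =>
    by_cases hj : j < ones.length
    · have hgt : ¬ ones.getD j 0 ≤ limit := fun hc => h ⟨hj, hc⟩
      have hgt' : ¬ ones[j] ≤ limit := by rwa [List.getD_eq_getElem _ _ hj] at hgt
      rw [List.drop_eq_getElem_cons hj, List.dropWhile_cons]
      simp [hgt']
    · rw [List.drop_eq_nil_of_le (le_of_not_gt hj)]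
      simp

theorem loopB_gcount (ones : List Int) (x count : Int) (j : Nat) :
    loopB ones x count j = count + gcount x (ones.drop j) := by
  fun_induction loopB with
  | case1 count j h ih =>
    rw [ih, skipB_drop, List.drop_eq_getElem_cons h, gcount_cons,
      List.getD_eq_getElem _ _ h]
    ring
  | case2 count j h =>
    rw [List.drop_eq_nil_of_le (le_of_not_gt h), gcount]
    ring

-- A's scan over any index list equals the greedy count over its one-positions past `last`
theorem foldA_gcount (a : List Int) (x : Int) (L : List Int) :
    ∀ (b last : Int),
      (L.foldl (fun s i => if PySem.List.pyGetD a i 0 = 1 ∧ s.2 < i then (s.1 + 1, i + x - 1) else s)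
        (b, last)).1
      = b + gcount x ((L.filter (fun i => PySem.List.pyGetD a i 0 == 1)).dropWhile
          (fun q => decide (q ≤ last))) := by
  induction L with
  | nil => intro b last; simp [gcount]
  | cons i L ih =>
    intro b last
    by_cases h1 : PySem.List.pyGetD a i 0 = 1
    · by_cases h2 : last < i
      · rw [List.foldl_cons, if_pos ⟨h1, h2⟩, ih,
          List.filter_cons_of_pos (by simp [h1]),
          List.dropWhile_cons_of_neg (by simp; omega), gcount_cons]
        ring
      · rw [List.foldl_cons, if_neg (by tauto), ih,
          List.filter_cons_of_pos (by simp [h1]),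
          List.dropWhile_cons_of_pos (by simp; omega)]
    · rw [List.foldl_cons, if_neg (by tauto), ih,
        List.filter_cons_of_neg (by simp [h1])]

theorem onesOf_eq_filter (a : List Int) :
    onesOf a = (PySem.List.pyRange 0 (a.length : Int) 1).filter
      (fun i => PySem.List.pyGetD a i 0 == 1) := by
  rw [onesOf, PySem.List.enumerate_eq_map_pyRange (d := 0), List.filter_map, List.map_map]
  simp [Function.comp_def]

theorem dropWhile_neg_of_all (l : List Int) (c : Int) (h : ∀ q ∈ l, c < q) :
    l.dropWhile (fun q => decide (q ≤ c)) = l := by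
  cases l with
  | nil => rfl
  | cons q t =>
    rw [List.dropWhile_cons]
    simp [show ¬ q ≤ c from by have := h q (by simp); omega]

theorem onesOf_nonneg (a : List Int) : ∀ q ∈ onesOf a, 0 ≤ q := by
  intro q hq
  rw [onesOf_eq_filter] at hq
  have := (PySem.List.mem_pyRange_one).1 (List.mem_of_mem_filter hq)
  omega

theorem check_eq (a : List Int) (x : Int) :
    checkA a (a.length : Int) x = boardsB (onesOf a) x := by
  rw [boardsB, loopB_gcount, List.drop_zero, checkA, foldA_gcount, onesOf_eq_filter]
  rw [dropWhile_neg_of_all _ _ (by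
    intro q hq
    rw [← onesOf_eq_filter] at hq
    have := onesOf_nonneg a q hq; omega)]

theorem onesOf_sorted (a : List Int) : (onesOf a).Pairwise (· < ·) := by
  rw [onesOf_eq_filter]
  exact List.Pairwise.filter _ (PySem.List.pairwise_lt_pyRange_one 0 (a.length : Int))

theorem gcount_nil (x : Int) : gcount x [] = 0 := by
  rw [gcount.eq_def]

theorem gcount_zero (l : List Int) (hs : l.Pairwise (· < ·)) :
    gcount 0 l = (l.length : Int) := by
  induction l with
  | nil => simp [gcount_nil]
  | cons h t ih =>
    have h1 := List.pairwise_cons.mp hs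
    rw [gcount_cons, dropWhile_neg_of_all t (h + 0 - 1)
      (fun q hq => by have := h1.1 q hq; omega), ih h1.2]
    simp
    omega

theorem dropWhile_le_dropWhile (l : List Int) (c d : Int) (hcd : c ≤ d) :
    l.dropWhile (fun q => decide (q ≤ d)) =
      (l.dropWhile (fun q => decide (q ≤ c))).dropWhile (fun q => decide (q ≤ d)) := by
  induction l with
  | nil => rfl
  | cons h t ih =>
    by_cases hc : h ≤ c
    · have hd : h ≤ d := le_trans hc hcd
      simpa [List.dropWhile_cons, hc, hd] using ih
    · by_cases hd : h ≤ d <;> simp [List.dropWhile_cons, hc, hd]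

theorem dropWhile_head_false {p : Int → Bool} :
    ∀ (l : List Int) (q : Int) (u : List Int), l.dropWhile p = q :: u → p q = false := by
  intro l
  induction l with
  | nil => intro q u h; simp at h
  | cons a t ih =>
    intro q u h
    rw [List.dropWhile_cons] at h
    by_cases ha : p a
    · rw [if_pos ha] at h; exact ih q u h
    · rw [if_neg ha] at h
      obtain ⟨rfl, -⟩ := List.cons.inj h
      simpa using ha

-- the master greedy lemma: dropping a LARGER covered prefix and using a LONGER board
-- never increases the greedy count (on a strictly increasing position list)
theorem gcount_master_aux :
    ∀ (N : Nat) (l : List Int), l.length ≤ N → l.Pairwise (· < ·) →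
    ∀ (x y c d : Int), 0 ≤ x → x ≤ y → c ≤ d →
    gcount y (l.dropWhile (fun q => decide (q ≤ d))) ≤
      gcount x (l.dropWhile (fun q => decide (q ≤ c))) := by
  intro N
  induction N with
  | zero =>
    intro l hl _ x y c d _ _ _
    cases l with
    | nil => simp [gcount_nil]
    | cons h t => simp at hl
  | succ N ih =>
    intro l hl hs x y c d hx hxy hcd
    cases l with
    | nil => simp [gcount_nil]
    | cons h t =>
      have hlt := List.pairwise_cons.mp hs
      have htN : t.length ≤ N := by simp at hl; omega
      by_cases hc : h ≤ c
      · have hd : h ≤ d := le_trans hc hcd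
        rw [List.dropWhile_cons_of_pos (by simpa using hd),
          List.dropWhile_cons_of_pos (by simpa using hc)]
        exact ih t htN hlt.2 x y c d hx hxy hcd
      · by_cases hd : h ≤ d
        · -- c < h ≤ d
          rw [List.dropWhile_cons_of_pos (by simpa using hd),
            List.dropWhile_cons_of_neg (by simpa using hc), gcount_cons]
          by_cases hy1 : 1 ≤ y
          · have key : gcount y (t.dropWhile (fun q => decide (q ≤ h + y - 1))) ≤
                gcount x (t.dropWhile (fun q => decide (q ≤ h + x - 1))) :=
              ih t htN hlt.2 x y (h + x - 1) (h + y - 1) hx hxy (by omega)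
            have main : gcount y (t.dropWhile (fun q => decide (q ≤ d))) ≤
                1 + gcount y (t.dropWhile (fun q => decide (q ≤ h + y - 1))) := by
              by_cases hdy : d ≤ h + y - 1
              · rw [dropWhile_le_dropWhile t d (h + y - 1) hdy]
                cases hu : t.dropWhile (fun q => decide (q ≤ d)) with
                | nil => simp [gcount_nil]
                | cons q u' =>
                  have hqd : ¬ q ≤ d := by
                    simpa using dropWhile_head_false t q u' hu
                  have hqt : q ∈ t :=
                    (List.dropWhile_sublist _).subset (hu ▸ List.mem_cons_self)
                  have hhq : h < q := hlt.1 q hqt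
                  have hqu : (q :: u').Pairwise (· < ·) := by
                    have := hlt.2.sublist (List.dropWhile_sublist (p := fun q => decide (q ≤ d)))
                    rwa [hu] at this
                  have hu'len : u'.length ≤ N := by
                    have := (List.dropWhile_sublist (l := t)
                      (p := fun q => decide (q ≤ d))).length_le
                    rw [hu] at this
                    simp at this
                    omega
                  have hu'pw : u'.Pairwise (· < ·) := (List.pairwise_cons.mp hqu).2
                  rw [gcount_cons]
                  by_cases hqy : q ≤ h + y - 1
                  · rw [List.dropWhile_cons_of_pos (by simpa using hqy)]
                    have := ih u' hu'len hu'pw y y (h + y - 1) (q + y - 1)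
                      (by omega) le_rfl (by omega)
                    omega
                  · rw [List.dropWhile_cons_of_neg (by simpa using hqy), gcount_cons]
                    have := gcount_nonneg y (u'.dropWhile (fun r => decide (r ≤ q + y - 1)))
                    omega
              · have e1 := dropWhile_le_dropWhile t (h + y - 1) d (by omega)
                have hslen : (t.dropWhile (fun q => decide (q ≤ h + y - 1))).length ≤ N :=
                  le_trans (List.dropWhile_sublist _).length_le htN
                have hspw : (t.dropWhile (fun q => decide (q ≤ h + y - 1))).Pairwise (· < ·) :=
                  hlt.2.sublist (List.dropWhile_sublist _)
                have e2 : (t.dropWhile (fun q => decide (q ≤ h + y - 1))).dropWhile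
                    (fun q => decide (q ≤ h + y - 1)) =
                    t.dropWhile (fun q => decide (q ≤ h + y - 1)) :=
                  (dropWhile_le_dropWhile t (h + y - 1) (h + y - 1) le_rfl).symm
                have h3 := ih (t.dropWhile (fun q => decide (q ≤ h + y - 1))) hslen hspw
                  y y (h + y - 1) d (by omega) le_rfl (by omega)
                rw [e2] at h3
                rw [e1]
                omega
            omega
          · -- y ≤ 0, hence x = y = 0
            have hx0 : x = 0 := by omega
            have hy0 : y = 0 := by omega
            subst hx0
            subst hy0
            rw [gcount_zero _ (hlt.2.sublist (List.dropWhile_sublist _)),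
              dropWhile_neg_of_all t (h + 0 - 1) (fun q hq => by have := hlt.1 q hq; omega),
              gcount_zero t hlt.2]
            have := (List.dropWhile_sublist (l := t)
              (p := fun q => decide (q ≤ d))).length_le
            push_cast
            omega
        · -- h > d ≥ c : both dropWhiles stop at h
          rw [List.dropWhile_cons_of_neg (by simp; omega),
            List.dropWhile_cons_of_neg (by simp; omega), gcount_cons, gcount_cons]
          have := ih t htN hlt.2 x y (h + x - 1) (h + y - 1) hx hxy (by omega)
          omega

theorem gcount_anti (l : List Int) (hs : l.Pairwise (· < ·)) (hpos : ∀ q ∈ l, 0 ≤ q)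
    (x y : Int) (hx : 0 ≤ x) (hxy : x ≤ y) :
    gcount y l ≤ gcount x l := by
  have h1 := gcount_master_aux l.length l le_rfl hs x y (-1) (-1) hx hxy le_rfl
  rwa [dropWhile_neg_of_all _ _ (by intro q hq; have := hpos q hq; omega)] at h1

-- P is monotone upward: a longer board never needs more boards
theorem boardsB_mono (a : List Int) (x y k : Int) (hx : 0 ≤ x) (hxy : x ≤ y)
    (h : boardsB (onesOf a) x ≤ k) : boardsB (onesOf a) y ≤ k := by
  have := gcount_anti (onesOf a) (onesOf_sorted a) (onesOf_nonneg a) x y hx hxy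
  simp only [boardsB, loopB_gcount, List.drop_zero] at *
  omega

-- A's binary search returns the least x in [0, n-1] with boards(x) ≤ k, else -1
theorem bsearchA_char (a : List Int) (k : Int) :
    ∀ (fuel : Nat) (start stop result : Int),
      (stop - start + 1).toNat ≤ fuel →
      0 ≤ start → start ≤ stop + 1 → stop ≤ (a.length : Int) - 1 →
      (∀ x, 0 ≤ x → x < start → ¬ boardsB (onesOf a) x ≤ k) →
      (∀ x, stop < x → x ≤ (a.length : Int) - 1 → boardsB (onesOf a) x ≤ k) →
      (stop + 1 ≤ (a.length : Int) - 1 → result = stop + 1) →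
      (¬ stop + 1 ≤ (a.length : Int) - 1 → result = -1) →
      (bsearchA a (a.length : Int) k start stop result = -1 ∧
        (∀ x, 0 ≤ x → x ≤ (a.length : Int) - 1 → ¬ boardsB (onesOf a) x ≤ k)) ∨
      (∃ r, bsearchA a (a.length : Int) k start stop result = r ∧ 0 ≤ r ∧
        r ≤ (a.length : Int) - 1 ∧ boardsB (onesOf a) r ≤ k ∧
        (∀ x, 0 ≤ x → x < r → ¬ boardsB (onesOf a) x ≤ k)) := by
  intro fuel
  induction fuel with
  | zero =>
    intro start stop result hfuel h0 h1 h2 hI1 hI3 hR1 hR2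
    have hss : ¬ start ≤ stop := by omega
    rw [bsearchA, dif_neg hss]
    by_cases hn : stop + 1 ≤ (a.length : Int) - 1
    · exact Or.inr ⟨stop + 1, by rw [hR1 hn], by omega, hn,
        hI3 (stop + 1) (by omega) hn, fun x hx0 hxlt => hI1 x hx0 (by omega)⟩
    · exact Or.inl ⟨hR2 hn, fun x hx0 hxle => hI1 x hx0 (by omega)⟩
  | succ N ih =>
    intro start stop result hfuel h0 h1 h2 hI1 hI3 hR1 hR2
    by_cases hss : start ≤ stop
    · rw [bsearchA, dif_pos hss]
      have hmid := PySem.Int.floordiv_two_mid_bounds hss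
      have hce : checkA a (a.length : Int) (PySem.Int.floordiv (start + stop) 2) =
          boardsB (onesOf a) (PySem.Int.floordiv (start + stop) 2) := check_eq a _
      by_cases hP : boardsB (onesOf a) (PySem.Int.floordiv (start + stop) 2) ≤ k
      · rw [if_pos (by rw [hce]; exact hP)]
        exact ih start (PySem.Int.floordiv (start + stop) 2 - 1)
          (PySem.Int.floordiv (start + stop) 2)
          (by omega) h0 (by omega) (by omega) hI1
          (fun x hx1 hx2 => boardsB_mono a _ x k (by omega) (by omega) hP)
          (by intro _; omega) (by intro hn; omega)
      · rw [if_neg (by rw [hce]; exact hP)]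
        refine ih (PySem.Int.floordiv (start + stop) 2 + 1) stop result
          (by omega) (by omega) (by omega) h2 ?_ hI3 hR1 hR2
        intro x hx0 hxlt
        by_cases hxs : x < start
        · exact hI1 x hx0 hxs
        · intro hPx
          exact hP (boardsB_mono a x _ k hx0 (by omega) hPx)
    · rw [bsearchA, dif_neg hss]
      by_cases hn : stop + 1 ≤ (a.length : Int) - 1
      · exact Or.inr ⟨stop + 1, by rw [hR1 hn], by omega, hn,
          hI3 (stop + 1) (by omega) hn, fun x hx0 hxlt => hI1 x hx0 (by omega)⟩
      · exact Or.inl ⟨hR2 hn, fun x hx0 hxle => hI1 x hx0 (by omega)⟩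

-- B's scan returns the least x in [0, n-1] with boards(x) ≤ k, else -1
theorem scanB_char (a : List Int) (k : Int) :
    ∀ (fuel : Nat) (x : Int),
      ((a.length : Int) - x).toNat ≤ fuel → 0 ≤ x →
      (∀ y, 0 ≤ y → y < x → ¬ boardsB (onesOf a) y ≤ k) →
      (scanB (onesOf a) k (a.length : Int) x = -1 ∧
        (∀ y, 0 ≤ y → y ≤ (a.length : Int) - 1 → ¬ boardsB (onesOf a) y ≤ k)) ∨
      (∃ r, scanB (onesOf a) k (a.length : Int) x = r ∧ 0 ≤ r ∧
        r ≤ (a.length : Int) - 1 ∧ boardsB (onesOf a) r ≤ k ∧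
        (∀ y, 0 ≤ y → y < r → ¬ boardsB (onesOf a) y ≤ k)) := by
  intro fuel
  induction fuel with
  | zero =>
    intro x hfuel hx hbelow
    have hxn : ¬ x < (a.length : Int) := by omega
    rw [scanB, dif_neg hxn]
    exact Or.inl ⟨rfl, fun y h0 hle => hbelow y h0 (by omega)⟩
  | succ N ih =>
    intro x hfuel hx hbelow
    by_cases hxn : x < (a.length : Int)
    · rw [scanB, dif_pos hxn]
      by_cases hP : boardsB (onesOf a) x ≤ k
      · rw [if_pos hP]
        exact Or.inr ⟨x, rfl, hx, by omega, hP, hbelow⟩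
      · rw [if_neg hP]
        refine ih (x + 1) (by omega) (by omega) ?_
        intro y h0 hlt
        by_cases hyx : y < x
        · exact hbelow y h0 hyx
        · have : y = x := by omega
          rwa [this]
    · rw [scanB, dif_neg hxn]
      exact Or.inl ⟨rfl, fun y h0 hle => hbelow y h0 (by omega)⟩

-- ===== VERDICT (by name: the statement is the Claim_ definition above) =====
theorem solution_spec : Claim_equal_solution := by
  intro a k _ _
  unfold Spec_solution solution solution_alt
  have hA := bsearchA_char a k ((a.length : Int)).toNat 0 ((a.length : Int) - 1) (-1)
    (by omega) le_rfl (by omega) le_rfl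
    (by intro x _ h; omega) (by intro x h1 h2; omega)
    (by omega) (fun _ => rfl)
  have hB := scanB_char a k ((a.length : Int)).toNat 0 (by omega) le_rfl
    (by intro y _ h; omega)
  rcases hA with ⟨eA, allA⟩ | ⟨r, eA, hr0, hrn, hrP, hrmin⟩ <;>
    rcases hB with ⟨eB, allB⟩ | ⟨s, eB, hs0, hsn, hsP, hsmin⟩
  · rw [eA, eB]
  · exact absurd hsP (allA s hs0 hsn)
  · exact absurd hrP (allB r hr0 hrn)
  · rw [eA, eB]
    rcases lt_trichotomy r s with h | h | h
    · exact absurd hrP (hsmin r hr0 h)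
    · exact h
    · exact absurd hsP (hrmin s hs0 h)
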